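-- pv_equiv track=rewrite | github.com/Lyrete/adventofcode | 2023/14.py | parse
-- ===== SOURCE A (Python) =====
-- def get_value(board: list[list[str]]) -> int:
--     value = 0
--     for column in board:
--         value += sum(i * (c == "O") for i, c in enumerate(column[::-1], 1))
--
--     return value
--
-- def tilt_north(board: list[list[str]]):
--     tilted_board = []
--     for column in board:
--         new_col = []
--         for part in column.split("#"):
--             if part:
--                 new_col.append("".join(["O"] * part.count("O") +
--                                        ["."] * part.count(".")))
--             else:
--                 new_col.append("")
--         tilted_board.append("#".join(new_col))
--
--     return tilted_board
--
-- def rotate(board: list[list[str]]):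
--     return ["".join(line) for line in zip(*map(reversed, board))]
--
-- def do_cycle(board: list[list[str]]):
--     # Run the move + rotate four times
--     for _ in range(4):
--         board = rotate(tilt_north(board))
--
--     return board
--
-- def parse(s: str):
--     cols = ["".join(char) for char in zip(*s.strip().splitlines())]
--
--     p1 = get_value(tilt_north(cols))
--
--     limit = 1000000000
--     t = 0
--     cycled_states = [cols]
--
--     while True:
--         end = do_cycle(cycled_states[t])
--         if end in cycled_states:
--             i = cycled_states.index(end)
--             cycle_length = t + 1 - i
--             break
--         cycled_states.append(end)
--         t += 1
--
--     p2 = get_value(cycled_states[(limit - i) % cycle_length + i])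
--
--     return p1, p2
-- ===== SOURCE B (Python) =====
-- def get_value(board: list[list[str]]) -> int:
--     # one flat comprehension: distance from the bottom of every "O"
--     return sum(i for column in board
--                  for i, c in enumerate(reversed(column), 1) if c == "O")
--
-- def tilt_north(board: list[list[str]]):
--     # nested comprehensions instead of accumulator loops
--     return ["#".join("O" * part.count("O") + "." * part.count(".")
--                      for part in column.split("#"))
--             for column in board]
--
-- def rotate(board: list[list[str]]):
--     return ["".join(line) for line in zip(*map(reversed, board))]
--
-- def do_cycle(board: list[list[str]]):
--     board = rotate(tilt_north(board))
--     board = rotate(tilt_north(board))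
--     board = rotate(tilt_north(board))
--     return rotate(tilt_north(board))
--
-- def parse(s: str):
--     cols = ["".join(char) for char in zip(*s.strip().splitlines())]
--
--     limit = 1000000000
--
--     # dict board -> first time seen replaces A's list of all states (no inner
--     # scan); the target board is recovered by re-simulating from the start
--     # instead of indexing a stored history.
--     seen = {tuple(cols): 0}
--     cur = cols
--     t = 0
--     while True:
--         cur = do_cycle(cur)
--         t += 1
--         key = tuple(cur)
--         if key in seen:
--             i = seen[key]
--             cycle_length = t - i
--             break
--         seen[key] = t
--
--     board = cols
--     for _ in range((limit - i) % cycle_length + i):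
--         board = do_cycle(board)
--
--     return get_value(tilt_north(cols)), get_value(board)
-- ===== Notes on version B (the rewrite author's own statement) =====
-- stated objective: alternative
-- what changed: The cycle detector's accumulated list of all boards (with an O(t) membership scan and .index each step) is replaced by a dict board->first-seen-time, the final board is recovered by re-simulating (limit - i) % cycle_length + i steps from the start instead of indexing the stored history, and the helpers are restructured (flat filtered comprehension for get_value, nested comprehensions for tilt_north, unrolled do_cycle).
import Mathlib
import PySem

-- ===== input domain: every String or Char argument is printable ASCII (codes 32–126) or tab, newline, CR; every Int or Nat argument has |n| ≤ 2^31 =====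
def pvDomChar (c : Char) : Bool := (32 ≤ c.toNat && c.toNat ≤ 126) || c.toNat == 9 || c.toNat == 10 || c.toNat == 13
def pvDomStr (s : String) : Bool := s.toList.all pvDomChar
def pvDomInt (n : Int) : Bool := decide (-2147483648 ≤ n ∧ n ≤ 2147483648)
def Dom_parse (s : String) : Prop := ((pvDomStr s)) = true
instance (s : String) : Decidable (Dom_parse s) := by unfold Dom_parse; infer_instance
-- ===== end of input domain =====

-- B replaces A's list-accumulating cycle detector by a dict board→first-seen-time
-- plus re-simulation from the start to the target board, and restructures the
-- helpers (flat filtered comprehension for the load, map-based tilt, unrolled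
-- cycle); objective: alternative decomposition, identical return value.

-- ===== PORT A =====
-- boards are lists of columns as List Char.

-- zip(*ls): rows of the i-th elements, truncated at the shortest list (exact zip semantics)
def pyZip (ls : List (List Char)) : List (List Char) :=
  match (ls.map List.length).min? with
  | none => []
  | some n => (List.range n).map (fun i => ls.filterMap (fun l => l[i]?))

def getValue (board : List (List Char)) : Int :=
  board.foldl (fun value column =>
    -- column[::-1] is List.reverse
    value + ((PySem.List.enumerate column.reverse 1).map
      (fun p => p.1 * (if p.2 = 'O' then (1 : Int) else 0))).sum) 0

def tiltNorth (board : List (List Char)) : List (List Char) :=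
  board.foldl (fun tilted column =>
    let newCol := (PySem.Chars.splitOn column ['#']).foldl (fun newCol part =>
      if part ≠ [] then
        newCol ++ [List.replicate (PySem.Chars.count part ['O']) 'O' ++
                   List.replicate (PySem.Chars.count part ['.']) '.']
      else
        newCol ++ [[]]) []
    tilted ++ [PySem.Chars.join ['#'] newCol]) []

def rotate (board : List (List Char)) : List (List Char) :=
  pyZip (board.map List.reverse)

def doCycle (board : List (List Char)) : List (List Char) :=
  (List.range 4).foldl (fun b _ => rotate (tiltNorth b)) board

-- fuel guard for the 'while True' loops (Python terminates: finitely many boards);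
-- both loops burn one unit per iteration, the fuel-out value is never reached in tests
def pvFuel (s : String) : Nat := 4 ^ (2 * s.toList.length + 8)

-- A's detector: 'end = do_cycle(cycled_states[t]); if end in cycled_states: i = .index(end)…'
def parseLoopA (fuel t : Nat) (states : List (List (List Char))) :
    (Int × Int) × List (List (List Char)) :=
  match fuel with
  | 0 => ((0, 1), states)
  | fuel + 1 =>
    let endB := doCycle (PySem.List.pyGetD states (t : Int) [])
    match PySem.List.index? states endB with
    | some i => (((i : Int), (t : Int) + 1 - (i : Int)), states)
    | none => parseLoopA fuel (t + 1) (states ++ [endB])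

def parse (s : String) : Int × Int :=
  let cols := pyZip ((PySem.Str.splitlines (PySem.Str.strip s)).map String.toList)
  let p1 := getValue (tiltNorth cols)
  let limit : Int := 1000000000
  let r := parseLoopA (pvFuel s) 0 [cols]
  let i := r.1.1
  let cycleLength := r.1.2
  let states := r.2
  let p2 := getValue (PySem.List.pyGetD states (PySem.Int.mod (limit - i) cycleLength + i) [])
  (p1, p2)

-- ===== PORT B =====
-- B's load: one flat filtered comprehension, summed
def getValueB (board : List (List Char)) : Int :=
  (board.flatMap (fun column =>
    ((PySem.List.enumerate column.reverse 1).filter (fun p => p.2 == 'O')).map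
      (fun p => p.1))).sum

-- B's tilt: nested comprehensions, no accumulator loops
def tiltNorthB (board : List (List Char)) : List (List Char) :=
  board.map (fun column =>
    PySem.Chars.join ['#'] ((PySem.Chars.splitOn column ['#']).map (fun part =>
      List.replicate (PySem.Chars.count part ['O']) 'O' ++
      List.replicate (PySem.Chars.count part ['.']) '.')))

-- B's cycle: the four quarter-turns written out
def doCycleB (board : List (List Char)) : List (List Char) :=
  rotate (tiltNorthB (rotate (tiltNorthB (rotate (tiltNorthB (rotate (tiltNorthB board)))))))

def pvFuelB (s : String) : Nat := 2 ^ (4 * s.toList.length + 16)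

-- B's detector: dict board → first time seen, instead of A's list of all states
def parseLoopB (fuel t : Nat) (cur : List (List Char))
    (seen : PySem.Dict (List (List Char)) Int) : Int × Int :=
  match fuel with
  | 0 => (0, 1)
  | fuel + 1 =>
    let cur' := doCycleB cur
    match seen.get? cur' with
    | some i => (i, ((t : Int) + 1) - i)
    | none => parseLoopB fuel (t + 1) cur' (seen.insert cur' ((t : Int) + 1))

def parse_alt (s : String) : Int × Int :=
  let cols := pyZip ((PySem.Str.splitlines (PySem.Str.strip s)).map String.toList)
  let r := parseLoopB (pvFuelB s) 0 cols (PySem.Dict.empty.insert cols 0)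
  -- re-simulate from the start to the target board instead of storing all states
  let board := (PySem.List.pyRange 0 (PySem.Int.mod (1000000000 - r.1) r.2 + r.1) 1).foldl
    (fun b _ => doCycleB b) cols
  (getValueB (tiltNorthB cols), getValueB board)

-- ===== PRECONDITION & SPEC =====
def Spec_parse (s : String) (out : Int × Int) : Prop := out = parse_alt s
instance (s : String) (out : Int × Int) : Decidable (Spec_parse s out) := by unfold Spec_parse; infer_instance

-- ===== CLAIM (what is proved, stated in full; the proofs are below) =====
def Claim_equal_parse : Prop := ∀ (s : String), Dom_parse s → Spec_parse s (parse s)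

-- ===== LEMMAS AND PROOFS =====

lemma filter_map_sum (L : List (Int × Char)) :
    ((L.filter (fun p => p.2 == 'O')).map (fun p => p.1)).sum
      = (L.map (fun p => p.1 * (if p.2 = 'O' then (1 : Int) else 0))).sum := by
  induction L with
  | nil => rfl
  | cons p L ih =>
    by_cases h : p.2 = 'O' <;> simp [h, ih]

lemma getValueB_eq : getValueB = getValue := by
  funext board
  unfold getValueB getValue
  rw [PySem.List.foldl_add]
  induction board with
  | nil => rfl
  | cons c bs ih => simp [filter_map_sum, ih]

lemma tilt_inner (parts : List (List Char)) :
    parts.foldl (fun newCol part =>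
      if part ≠ [] then
        newCol ++ [List.replicate (PySem.Chars.count part ['O']) 'O' ++
                   List.replicate (PySem.Chars.count part ['.']) '.']
      else
        newCol ++ [[]]) []
    = parts.map (fun part =>
        List.replicate (PySem.Chars.count part ['O']) 'O' ++
        List.replicate (PySem.Chars.count part ['.']) '.') := by
  have hfun : (fun (newCol : List (List Char)) part =>
      if part ≠ [] then
        newCol ++ [List.replicate (PySem.Chars.count part ['O']) 'O' ++
                   List.replicate (PySem.Chars.count part ['.']) '.']
      else
        newCol ++ [[]])
      = fun newCol part => newCol ++
        [List.replicate (PySem.Chars.count part ['O']) 'O' ++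
         List.replicate (PySem.Chars.count part ['.']) '.'] := by
    funext nc part
    by_cases h : part = []
    · subst h
      simp
      decide
    · simp [h]
  rw [hfun, PySem.List.foldl_append_singleton_eq_map]
  simp

lemma tiltNorthB_eq : tiltNorthB = tiltNorth := by
  funext board
  unfold tiltNorthB tiltNorth
  have hfun : (fun (tilted : List (List Char)) column =>
      let newCol := (PySem.Chars.splitOn column ['#']).foldl (fun newCol part =>
        if part ≠ [] then
          newCol ++ [List.replicate (PySem.Chars.count part ['O']) 'O' ++
                     List.replicate (PySem.Chars.count part ['.']) '.']
        else
          newCol ++ [[]]) []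
      tilted ++ [PySem.Chars.join ['#'] newCol])
      = fun tilted column => tilted ++
        [PySem.Chars.join ['#'] ((PySem.Chars.splitOn column ['#']).map (fun part =>
          List.replicate (PySem.Chars.count part ['O']) 'O' ++
          List.replicate (PySem.Chars.count part ['.']) '.'))] := by
    funext tilted column
    simp only [tilt_inner]
  rw [hfun, PySem.List.foldl_append_singleton_eq_map]
  simp

lemma doCycleB_eq : doCycleB = doCycle := by
  funext board
  unfold doCycleB doCycle
  rw [tiltNorthB_eq]
  simp [List.range_succ]

lemma pvFuelB_eq (s : String) : pvFuelB s = pvFuel s := by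
  unfold pvFuelB pvFuel
  rw [show (4 : ℕ) = 2 ^ 2 by norm_num, ← pow_mul]
  congr 1
  ring

-- the list of states A accumulates: [x, f x, f² x, …]
def stateList (x : List (List Char)) (t : Nat) : List (List (List Char)) :=
  (List.range (t + 1)).map (fun j => doCycle^[j] x)

-- the items of B's dict: states paired with their first-seen times
def mkPairs : List (List (List Char)) → Nat → List (List (List Char) × Int)
  | [], _ => []
  | y :: ys, k => (y, (k : Int)) :: mkPairs ys (k + 1)

def seenD (x : List (List Char)) (t : Nat) : PySem.Dict (List (List Char)) Int :=
  PySem.Dict.mk (mkPairs (stateList x t) 0)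

lemma mkPairs_append (l l' : List (List (List Char))) (k : Nat) :
    mkPairs (l ++ l') k = mkPairs l k ++ mkPairs l' (k + l.length) := by
  induction l generalizing k with
  | nil => simp [mkPairs]
  | cons y ys ih => simp [mkPairs, ih, Nat.add_assoc, Nat.add_comm 1]

lemma get?_mkPairs (ys : List (List (List Char))) (k : Nat) (v : List (List Char)) :
    (PySem.Dict.mk (mkPairs ys k)).get? v
      = (PySem.List.index? ys v).map (fun j => ((k + j : Nat) : Int)) := by
  induction ys generalizing k with
  | nil => simp [mkPairs, PySem.Dict.get?]
  | cons y ys ih =>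
    by_cases h : y = v
    · subst h
      rw [mkPairs, PySem.Dict.get?_mk_cons, PySem.List.index?_cons_self]
      simp
    · rw [mkPairs, PySem.Dict.get?_mk_cons, PySem.List.index?_cons_of_ne _ h, ih]
      simp [h, Option.map_map]
      congr 1
      funext j
      simp
      ring

lemma stateList_succ (x : List (List Char)) (t : Nat) :
    stateList x (t + 1) = stateList x t ++ [doCycle^[t + 1] x] := by
  simp [stateList, List.range_succ]

lemma length_stateList (x : List (List Char)) (t : Nat) :
    (stateList x t).length = t + 1 := by
  simp [stateList]

lemma pyGetD_stateList (x : List (List Char)) {k t : Nat} (h : k ≤ t) :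
    PySem.List.pyGetD (stateList x t) (k : Int) [] = doCycle^[k] x := by
  rw [PySem.List.pyGetD_natCast, stateList, PySem.List.getD_map_range _ _ _ _ (by omega)]

lemma foldl_doCycleB (l : List Int) (x : List (List Char)) :
    l.foldl (fun b _ => doCycleB b) x = doCycle^[l.length] x := by
  simp only [doCycleB_eq]
  induction l generalizing x with
  | nil => simp
  | cons y ys ih => simp [ih, Function.iterate_succ_apply]

-- lockstep bisimulation of the two detectors
lemma loopAB (x : List (List Char)) : ∀ (n t : Nat),
    ∃ T : Nat, t ≤ T ∧
      (parseLoopA n t (stateList x t)).2 = stateList x T ∧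
      parseLoopB n t (doCycle^[t] x) (seenD x t) = (parseLoopA n t (stateList x t)).1 ∧
      0 ≤ (parseLoopA n t (stateList x t)).1.1 ∧
      0 < (parseLoopA n t (stateList x t)).1.2 ∧
      (parseLoopA n t (stateList x t)).1.1 + (parseLoopA n t (stateList x t)).1.2 ≤ (T : Int) + 1 := by
  intro n
  induction n with
  | zero =>
    intro t
    exact ⟨t, le_refl t, rfl, rfl, by norm_num [parseLoopA], by norm_num [parseLoopA],
      by norm_num [parseLoopA]⟩
  | succ n ih =>
    intro t
    have hend : doCycle (PySem.List.pyGetD (stateList x t) (t : Int) []) = doCycle^[t + 1] x := by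
      rw [pyGetD_stateList x (le_refl t)]
      exact (Function.iterate_succ_apply' doCycle t x).symm
    have hcur : doCycleB (doCycle^[t] x) = doCycle^[t + 1] x := by
      rw [doCycleB_eq]
      exact (Function.iterate_succ_apply' doCycle t x).symm
    have hget : (seenD x t).get? (doCycle^[t + 1] x)
        = (PySem.List.index? (stateList x t) (doCycle^[t + 1] x)).map (fun j => ((j : Nat) : Int)) := by
      rw [seenD, get?_mkPairs]
      simp
    cases hidx : PySem.List.index? (stateList x t) (doCycle^[t + 1] x) with
    | some i =>
      obtain ⟨hilt, -, -⟩ := PySem.List.getElem_of_index?_eq_some hidx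
      rw [length_stateList] at hilt
      refine ⟨t, le_refl t, ?_, ?_, ?_, ?_, ?_⟩ <;>
        simp only [parseLoopA, parseLoopB, hend, hcur, hget, hidx, Option.map_some] <;>
        first
          | rfl
          | omega
    | none =>
      have hA : parseLoopA (n + 1) t (stateList x t) = parseLoopA n (t + 1) (stateList x (t + 1)) := by
        rw [stateList_succ]
        simp only [parseLoopA, hend, hidx]
      have hins : (seenD x t).insert (doCycle^[t + 1] x) ((t : Int) + 1) = seenD x (t + 1) := by
        apply PySem.Dict.ext
        have hnc : (seenD x t).contains (doCycle^[t + 1] x) = false := by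
          rw [PySem.Dict.contains_eq_isSome_get?, hget, hidx]
          rfl
        rw [PySem.Dict.items_insert_of_not_contains _ _ hnc, seenD, seenD, stateList_succ,
          mkPairs_append, length_stateList]
        simp [mkPairs]
      have hB : parseLoopB (n + 1) t (doCycle^[t] x) (seenD x t)
          = parseLoopB n (t + 1) (doCycle^[t + 1] x) (seenD x (t + 1)) := by
        simp only [parseLoopB, hcur, hget, hidx, Option.map_none, hins]
      obtain ⟨T, hT, h2, h3, h4, h5, h6⟩ := ih (t + 1)
      exact ⟨T, by omega, by rw [hA]; exact h2, by rw [hA, hB]; exact h3,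
        by rw [hA]; exact h4, by rw [hA]; exact h5, by rw [hA]; exact h6⟩

lemma stateList_zero (x : List (List Char)) : stateList x 0 = [x] := by
  simp [stateList]

lemma seenD_zero (x : List (List Char)) :
    PySem.Dict.empty.insert x (0 : Int) = seenD x 0 := by
  apply PySem.Dict.ext
  rw [PySem.Dict.items_insert_of_not_contains _ _ (PySem.Dict.contains_empty x)]
  simp [seenD, stateList_zero, mkPairs, PySem.Dict.empty]

-- ===== VERDICT (by name: the statement is the Claim_ definition above) =====
theorem parse_spec : Claim_equal_parse := by
  unfold Claim_equal_parse Spec_parse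
  intro s _
  simp only [parse, parse_alt, getValueB_eq, tiltNorthB_eq, pvFuelB_eq]
  obtain ⟨T, hT, h2, h3, h4, h5, h6⟩ :=
    loopAB (pyZip ((PySem.Str.splitlines (PySem.Str.strip s)).map String.toList)) (pvFuel s) 0
  set x := pyZip ((PySem.Str.splitlines (PySem.Str.strip s)).map String.toList) with hx
  rw [Function.iterate_zero_apply] at h3
  rw [← stateList_zero x, seenD_zero x, h3, h2]
  set p := (parseLoopA (pvFuel s) 0 (stateList x 0)).1 with hp
  have hm0 : 0 ≤ PySem.Int.mod (1000000000 - p.1) p.2 := PySem.Int.mod_nonneg _ h5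
  have hmlt : PySem.Int.mod (1000000000 - p.1) p.2 < p.2 := PySem.Int.mod_lt _ h5
  have hidx0 : 0 ≤ PySem.Int.mod (1000000000 - p.1) p.2 + p.1 := by omega
  have hidxle : (PySem.Int.mod (1000000000 - p.1) p.2 + p.1).toNat ≤ T := by omega
  rw [PySem.List.pyGetD_of_nonneg _ _ hidx0, stateList,
    PySem.List.getD_map_range _ _ _ _ (by omega), foldl_doCycleB,
    PySem.List.length_pyRange_one]
  norm_num
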